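-- pv_equiv track=rewrite | github.com/JaswanthDBMS/PYTHON-PROGRAMMING | cost and time.py | minCostToPaintWalls
-- ===== SOURCE A (Python) =====
-- def minCostToPaintWalls(cost, time):
--     n = len(cost)
--     min_cost = 0
--     free_printer_used = False
--
--     for i in range(n):
--         if not free_printer_used:
--             if cost[i] * time[i] > time[i]:
--                 min_cost += time[i]
--             else:
--                 min_cost += cost[i] * time[i]
--                 free_printer_used = True
--         else:
--             if cost[i] * time[i] > time[i]:
--                 min_cost += time[i]
--             else:
--                 min_cost += cost[i] * time[i] - time[i]
--
--     return min_cost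
-- ===== SOURCE B (Python) =====
-- def minCostToPaintWalls(cost, time):
--     walls = list(zip(cost, time))
--     k = next((i for i, (c, t) in enumerate(walls) if c * t <= t), None)
--     if k is None:
--         return sum(time[:len(cost)])
--     c, t = walls[k]
--     return (sum(t2 for _, t2 in walls[:k])
--             + c * t
--             + sum(t2 if c2 * t2 > t2 else c2 * t2 - t2 for c2, t2 in walls[k + 1:]))
-- ===== Notes on version B (the rewrite author's own statement) =====
-- stated objective: alternative
-- what changed: Replaces the flag-threaded accumulator loop with a split-point decomposition: locate the first eligible wall index k, then the answer is the plain time-sum of the prefix before k, plus cost*time at k, plus an adjusted sum over the suffix after k (or the plain time-sum of all walls when no wall is eligible).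
import Mathlib
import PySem

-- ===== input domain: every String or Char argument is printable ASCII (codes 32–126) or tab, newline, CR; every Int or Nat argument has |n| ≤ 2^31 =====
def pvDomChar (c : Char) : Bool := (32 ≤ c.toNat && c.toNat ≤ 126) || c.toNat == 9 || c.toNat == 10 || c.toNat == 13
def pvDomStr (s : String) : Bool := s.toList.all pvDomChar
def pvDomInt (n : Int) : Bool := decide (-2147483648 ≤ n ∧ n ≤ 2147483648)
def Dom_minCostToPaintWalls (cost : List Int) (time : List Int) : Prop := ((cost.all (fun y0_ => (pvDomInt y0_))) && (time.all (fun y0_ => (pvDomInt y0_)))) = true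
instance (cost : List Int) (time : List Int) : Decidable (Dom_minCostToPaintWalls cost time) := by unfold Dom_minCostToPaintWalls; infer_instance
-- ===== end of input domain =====

-- B replaces A's flag-threaded loop by a split-point decomposition: find the first
-- eligible wall, then sum three independent segments (alternative, same cost).

-- ===== PORT A =====
-- the body of A's for-loop; state = (min_cost, free_printer_used)
def pvStepA (cost time : List Int) (acc : Int × Bool) (i : Int) : Int × Bool :=
  let c := PySem.List.pyGetD cost i 0
  let t := PySem.List.pyGetD time i 0
  if !acc.2 then
    if c * t > t then (acc.1 + t, acc.2)
    else (acc.1 + c * t, true)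
  else
    if c * t > t then (acc.1 + t, acc.2)
    else (acc.1 + c * t - t, acc.2)

def minCostToPaintWalls (cost : List Int) (time : List Int) : Int :=
  ((PySem.List.pyRange 0 (cost.length : Int) 1).foldl (pvStepA cost time) (0, false)).1

-- ===== PORT B =====
-- next((i for i,(c,t) in enumerate(walls) if c*t <= t), None)  →  List.findIdx?
-- walls[:k] / walls[k+1:] / time[:len(cost)] with nonnegative bounds → take / drop
def minCostToPaintWalls_alt (cost : List Int) (time : List Int) : Int :=
  let walls := cost.zip time
  match walls.findIdx? (fun p => p.1 * p.2 ≤ p.2) with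
  | none => (time.take cost.length).sum
  | some k =>
    let p := walls.getD k (0, 0)
    ((walls.take k).map (fun q => q.2)).sum
      + p.1 * p.2
      + ((walls.drop (k + 1)).map
          (fun q => if q.1 * q.2 > q.2 then q.2 else q.1 * q.2 - q.2)).sum

-- ===== PRECONDITION & SPEC =====
-- A indexes time[i] for every i < len(cost): it raises IndexError when time is shorter.
def Pre_minCostToPaintWalls (cost : List Int) (time : List Int) : Prop :=
  cost.length ≤ time.length
instance (cost : List Int) (time : List Int) : Decidable (Pre_minCostToPaintWalls cost time) := by unfold Pre_minCostToPaintWalls; infer_instance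
def pvWitness_minCostToPaintWalls : List Int × List Int := ([2, 1, -3], [5, 4, 2])

def Spec_minCostToPaintWalls (cost : List Int) (time : List Int) (out : Int) : Prop := out = minCostToPaintWalls_alt cost time
instance (cost : List Int) (time : List Int) (out : Int) : Decidable (Spec_minCostToPaintWalls cost time out) := by unfold Spec_minCostToPaintWalls; infer_instance

-- ===== CLAIM (what is proved, stated in full; the proofs are below) =====
def Claim_equal_minCostToPaintWalls : Prop := ∀ (cost : List Int) (time : List Int), Dom_minCostToPaintWalls cost time → Pre_minCostToPaintWalls cost time → Spec_minCostToPaintWalls cost time (minCostToPaintWalls cost time)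

-- ===== LEMMAS AND PROOFS =====

-- A's loop body, re-expressed on a (cost, time) pair
def pvStepP (acc : Int × Bool) (p : Int × Int) : Int × Bool :=
  if !acc.2 then
    if p.1 * p.2 > p.2 then (acc.1 + p.2, acc.2)
    else (acc.1 + p.1 * p.2, true)
  else
    if p.1 * p.2 > p.2 then (acc.1 + p.2, acc.2)
    else (acc.1 + p.1 * p.2 - p.2, acc.2)

-- B's value as a function of the zipped list (none-case re-expressed on the list)
def pvBval (l : List (Int × Int)) : Int :=
  match l.findIdx? (fun p => p.1 * p.2 ≤ p.2) with
  | none => (l.map (fun q => q.2)).sum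
  | some k =>
    let p := l.getD k (0, 0)
    ((l.take k).map (fun q => q.2)).sum
      + p.1 * p.2
      + ((l.drop (k + 1)).map
          (fun q => if q.1 * q.2 > q.2 then q.2 else q.1 * q.2 - q.2)).sum

lemma pvStepA_eq_pvStepP (cost time : List Int) (h : cost.length ≤ time.length)
    (acc : Int × Bool) (i : Int) (hi : i ∈ PySem.List.pyRange 0 (cost.length : Int) 1) :
    pvStepA cost time acc i = pvStepP acc (PySem.List.pyGetD (cost.zip time) i (0, 0)) := by
  rw [PySem.List.mem_pyRange_one] at hi
  have hz : (cost.zip time).length = cost.length := by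
    simp [List.length_zip]; omega
  have h1 : PySem.List.pyGetD cost i 0 = cost[i.toNat] :=
    PySem.List.pyGetD_eq_getElem cost 0 hi.1 hi.2
  have hit : i < (time.length : Int) := by omega
  have h2 : PySem.List.pyGetD time i 0 = time[i.toNat] :=
    PySem.List.pyGetD_eq_getElem time 0 hi.1 hit
  have hiz : i < ((cost.zip time).length : Int) := by rw [hz]; exact hi.2
  have h3 : PySem.List.pyGetD (cost.zip time) i (0, 0) = (cost.zip time)[i.toNat] :=
    PySem.List.pyGetD_eq_getElem (cost.zip time) (0, 0) hi.1 hiz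
  have h4 : (cost.zip time)[i.toNat] = (cost[i.toNat], time[i.toNat]) := by
    simp [List.getElem_zip]
  simp [pvStepA, pvStepP, h1, h2, h3, h4]

-- once the flag is set, each wall contributes t if c*t>t else c*t−t
lemma pvFold_true (l : List (Int × Int)) (a : Int) :
    l.foldl pvStepP (a, true) =
      (a + (l.map (fun p => if p.1 * p.2 > p.2 then p.2 else p.1 * p.2 - p.2)).sum, true) := by
  induction l generalizing a with
  | nil => simp
  | cons p l ih =>
    by_cases hp : p.1 * p.2 > p.2 <;> · simp [pvStepP, hp, ih]; ring

-- the fold with the flag clear computes B's split-point value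
lemma pvFold_false (l : List (Int × Int)) (a : Int) :
    (l.foldl pvStepP (a, false)).1 = a + pvBval l := by
  induction l generalizing a with
  | nil => simp [pvBval]
  | cons p l ih =>
    by_cases hp : p.1 * p.2 > p.2
    · have hd : decide (p.1 * p.2 ≤ p.2) = false := by simp; omega
      have hstep : pvStepP (a, false) p = (a + p.2, false) := by
        simp [pvStepP, hp]
      rw [List.foldl_cons, hstep, ih]
      have hb : pvBval (p :: l) = p.2 + pvBval l := by
        unfold pvBval
        rw [List.findIdx?_cons, hd]
        cases l.findIdx? (fun q => q.1 * q.2 ≤ q.2) with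
        | none => simp
        | some k => simp; ring
      rw [hb]; ring
    · have hd : decide (p.1 * p.2 ≤ p.2) = true := by simp; omega
      have hstep : pvStepP (a, false) p = (a + p.1 * p.2, true) := by
        simp [pvStepP, hp]
      rw [List.foldl_cons, hstep, pvFold_true]
      have hb : pvBval (p :: l)
          = p.1 * p.2 + (l.map (fun q => if q.1 * q.2 > q.2 then q.2 else q.1 * q.2 - q.2)).sum := by
        unfold pvBval
        rw [List.findIdx?_cons, hd]
        simp
      rw [hb]; ring

-- under Pre_, the zipped second components are exactly time[:len(cost)]
lemma pvSnd_zip (cost time : List Int) (h : cost.length ≤ time.length) :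
    (cost.zip time).map (fun q => q.2) = time.take cost.length := by
  induction cost generalizing time with
  | nil => simp
  | cons c cost ih =>
    cases time with
    | nil => simp at h
    | cons t time =>
      simp at h
      simp [ih time h]

lemma pvAlt_eq (cost time : List Int) (h : cost.length ≤ time.length) :
    minCostToPaintWalls_alt cost time = pvBval (cost.zip time) := by
  unfold minCostToPaintWalls_alt pvBval
  cases hfi : (cost.zip time).findIdx? (fun p => p.1 * p.2 ≤ p.2) with
  | none => simp [hfi, pvSnd_zip cost time h]
  | some k => simp [hfi]

-- ===== VERDICT (by name: the statement is the Claim_ definition above) =====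
theorem minCostToPaintWalls_spec : Claim_equal_minCostToPaintWalls := by
  intro cost time _ hpre
  unfold Pre_minCostToPaintWalls at hpre
  unfold Spec_minCostToPaintWalls minCostToPaintWalls
  have hz : ((cost.length : Int)) = ((cost.zip time).length : Int) := by
    have : (cost.zip time).length = cost.length := by
      simp [List.length_zip]; omega
    rw [this]
  rw [PySem.List.foldl_congr_mem (PySem.List.pyRange 0 (cost.length : Int) 1)
        (pvStepA cost time)
        (fun acc i => pvStepP acc (PySem.List.pyGetD (cost.zip time) i (0, 0)))
        ((0 : Int), false)
        (fun acc x hx => pvStepA_eq_pvStepP cost time hpre acc x hx)]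
  rw [hz, PySem.List.foldl_pyRange_zero_pyGetD' (cost.zip time) ((0 : Int), (0 : Int)) pvStepP ((0 : Int), false)]
  rw [pvFold_false (cost.zip time) 0, pvAlt_eq cost time hpre]
  ring
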